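-- pv_equiv track=rewrite | github.com/AlgorithmStudy-Allumbus/codingtest_algorithm_study | Hongjoo/lv1/둘만의암호.py | solution
-- ===== SOURCE A (Python) =====
-- def solution(s, skip, index):
--     li =["a","b","c","d","e","f","g","h","i","j","k","l","m","n","o","p","q","r","s","t","u","v","w","x","y","z"]
--     sub_li = list(skip)
--     # 1.res_li = li - list(skip) // Difference
--     res_li = [x for x in li if x not in sub_li]
--     input = list(s)
--     answer = ''
--     #2. find matching element's index(k) and add "index"
--     # if the adding index is out of range ,using mod
--     for i in range(len(input)):
--         for k in range(len(res_li)):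
--             if input[i] == res_li[k]:
--                 answer += res_li[(k+index)%len(res_li)]
--                 break
--     return answer
-- ===== SOURCE B (Python) =====
-- def solution(s, skip, index):
--     # Order-statistics approach: never materialize the reduced alphabet.
--     # removed = sorted distinct positions (0..25) of skipped lowercase letters.
--     removed = sorted({ord(c) - 97 for c in skip if 'a' <= c <= 'z'})
--     n = 26 - len(removed)
--     out = []
--     for ch in s:
--         p = ord(ch) - 97
--         if p < 0 or p >= 26 or p in removed:
--             continue
--         # rank of ch in the reduced alphabet = p minus removed letters below it
--         below = sum(1 for r in removed if r < p)
--         q = (p - below + index) % n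
--         # unrank: walk the sorted removed positions to re-insert the gaps
--         for r in removed:
--             if r <= q:
--                 q += 1
--         out.append(chr(97 + q))
--     return ''.join(out)
-- ===== Notes on version B (the rewrite author's own statement) =====
-- stated objective: faster
-- what changed: A materializes the reduced alphabet and rescans it with an inner break-loop for every character of s; B never builds a reduced alphabet at all: it keeps only the sorted distinct removed positions and, per character, computes the rank arithmetically (position minus removed letters below), shifts it mod n, and un-ranks by re-inserting the gaps over the removed positions.
import Mathlib
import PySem

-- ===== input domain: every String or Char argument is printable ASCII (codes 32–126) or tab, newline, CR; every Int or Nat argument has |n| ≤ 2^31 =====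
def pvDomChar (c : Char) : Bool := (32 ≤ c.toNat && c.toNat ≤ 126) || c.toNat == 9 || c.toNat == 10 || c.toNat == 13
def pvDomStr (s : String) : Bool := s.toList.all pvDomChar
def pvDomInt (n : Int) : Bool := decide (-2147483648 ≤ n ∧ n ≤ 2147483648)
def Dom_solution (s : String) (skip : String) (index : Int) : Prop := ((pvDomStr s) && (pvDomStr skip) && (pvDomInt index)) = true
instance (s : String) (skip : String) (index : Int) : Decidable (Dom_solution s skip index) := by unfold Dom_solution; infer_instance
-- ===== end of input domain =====

-- B drops A's reduced-alphabet list and its per-character inner scan entirely: it works by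
-- order statistics on the sorted removed positions (rank = position minus removed letters
-- below; unrank = re-insert the gaps), one arithmetic pass per character (objective: faster; a timing run measured B faster).

-- ===== PORT A =====
-- inner 'for k in range(len(res_li)): if input[i] == res_li[k]: answer += res_li[(k+index)%len(res_li)]; break'
-- (indices produced by range are in bounds, so xs[k] is ported by pyGetD; exact there)
def solInner (res : List Char) (index : Int) (c : Char) : List Int → List Char
  | [] => []
  | k :: ks =>
    if c = PySem.List.pyGetD res k 'a'
    then [PySem.List.pyGetD res (PySem.Int.mod (k + index) (PySem.List.len res)) 'a']
    else solInner res index c ks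

def solution (s : String) (skip : String) (index : Int) : String :=
  let li : List Char := ['a','b','c','d','e','f','g','h','i','j','k','l','m','n','o','p','q','r','s','t','u','v','w','x','y','z']
  let subLi := skip.toList
  let resLi := li.filter (fun x => !(subLi.contains x))
  let input := s.toList
  let answer : List Char :=
    (PySem.List.pyRange 0 (PySem.List.len input) 1).foldl
      (fun acc i => acc ++ solInner resLi index (PySem.List.pyGetD input i 'a') (PySem.List.pyRange 0 (PySem.List.len resLi) 1)) []
  String.mk answer

-- ===== PORT B =====
-- 'a' <= c <= 'z' is compared by code point (exact); chr(97+q) is Char.ofNat (q stays in 0..25,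
-- so the value is a valid code point and chr is exact); sum(1 for r in removed if r < p) is the
-- count of elements below p, ported as filter+length.
def solution_alt (s : String) (skip : String) (index : Int) : String :=
  let removed : List Int :=
    PySem.List.sorted (PySem.Set.ofList
      ((skip.toList.filter (fun c => 97 ≤ c.toNat && c.toNat ≤ 122)).map
        (fun c => (c.toNat : Int) - 97))) (fun x => x) false
  let n : Int := 26 - PySem.List.len removed
  let out : List Char := s.toList.foldl (fun acc ch =>
    let p : Int := (ch.toNat : Int) - 97
    if p < 0 || 26 ≤ p || removed.contains p then acc
    else
      let below : Int := ((removed.filter (fun r => r < p)).length : Int)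
      let q0 : Int := PySem.Int.mod (p - below + index) n
      let q : Int := removed.foldl (fun q r => if r ≤ q then q + 1 else q) q0
      acc ++ [Char.ofNat (97 + q).toNat]) []
  String.mk out

-- ===== PRECONDITION & SPEC =====
def Spec_solution (s : String) (skip : String) (index : Int) (out : String) : Prop := out = solution_alt s skip index
instance (s : String) (skip : String) (index : Int) (out : String) : Decidable (Spec_solution s skip index out) := by unfold Spec_solution; infer_instance

-- ===== CLAIM (what is proved, stated in full; the proofs are below) =====
def Claim_equal_solution : Prop := ∀ (s : String) (skip : String) (index : Int), Dom_solution s skip index → Spec_solution s skip index (solution s skip index)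

-- ===== LEMMAS AND PROOFS =====

-- letter with alphabet position q
def f26 (q : Nat) : Char := Char.ofNat (97 + q)
-- position q survives (its letter is not in skip)
def keepP (sk : List Char) (q : Nat) : Bool := !(sk.contains (f26 q))
-- surviving / removed positions below N, in increasing order
def keptL (sk : List Char) (N : Nat) : List Nat := (List.range N).filter (keepP sk)
def remL (sk : List Char) (N : Nat) : List Nat := (List.range N).filter (fun q => !(keepP sk q))

theorem f26_toNat (q : Nat) (h : q < 26) : (f26 q).toNat = 97 + q := by
  unfold f26; interval_cases q <;> decide

theorem f26_inj (q q' : Nat) (h : q < 26) (h' : q' < 26) (he : f26 q = f26 q') : q = q' := by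
  have := congrArg Char.toNat he
  rw [f26_toNat q h, f26_toNat q' h'] at this
  omega

theorem alphabet_eq : (['a','b','c','d','e','f','g','h','i','j','k','l','m','n','o','p','q','r','s','t','u','v','w','x','y','z'] : List Char) = (List.range 26).map f26 := by
  decide

theorem kept_rem_len (sk : List Char) (N : Nat) : (keptL sk N).length + (remL sk N).length = N := by
  have h : (List.range N).length = (keptL sk N).length + (remL sk N).length :=
    List.length_eq_length_filter_add (keepP sk)
  simp only [List.length_range] at h
  omega

theorem mem_keptL (sk : List Char) (N q : Nat) : q ∈ keptL sk N ↔ q < N ∧ keepP sk q = true := by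
  unfold keptL; simp

theorem mem_remL (sk : List Char) (N q : Nat) : q ∈ remL sk N ↔ q < N ∧ keepP sk q = false := by
  unfold remL; simp

theorem range26_split (p : Nat) (h : p < 26) :
    List.range 26 = (List.range p ++ [p]) ++ (List.range (25 - p)).map ((p+1) + ·) := by
  have h26 : 26 = (p+1) + (25-p) := by omega
  rw [h26, List.range_add, List.range_succ]

-- splitting the kept/removed lists at a kept position p
theorem keptL_split (sk : List Char) (p : Nat) (hp : p < 26) (hk : keepP sk p = true) :
    keptL sk 26 = (keptL sk p ++ [p]) ++ ((List.range (25 - p)).map ((p+1) + ·)).filter (keepP sk) := by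
  unfold keptL
  rw [range26_split p hp, List.filter_append, List.filter_append]
  simp [hk]

theorem remL_split (sk : List Char) (p : Nat) (hp : p < 26) (hk : keepP sk p = true) :
    remL sk 26 = remL sk p ++ ((List.range (25 - p)).map ((p+1) + ·)).filter (fun q => !(keepP sk q)) := by
  unfold remL
  rw [range26_split p hp, List.filter_append, List.filter_append]
  simp [hk]

-- ===== A's inner scan = first-match index lookup =====
theorem scan_eq_index? (res : List Char) (index : Int) (c : Char) :
    ∀ (suf pre : List Char), res = pre ++ suf →
    solInner res index c (PySem.List.pyRange (pre.length : Int) (PySem.List.len res) 1) =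
      (match PySem.List.index? suf c with
       | none => []
       | some j => [PySem.List.pyGetD res (PySem.Int.mod (((pre.length + j : Nat) : Int) + index) (PySem.List.len res)) 'a']) := by
  intro suf
  induction suf with
  | nil =>
    intro pre h
    subst h
    have hr : PySem.List.pyRange ((pre.length : Int)) (PySem.List.len (pre ++ ([] : List Char))) 1 = [] := by
      apply PySem.List.pyRange_one_eq_nil
      rw [PySem.List.len_eq]; simp
    rw [hr]
    rfl
  | cons x t ih =>
    intro pre h
    have hlt : (pre.length : Int) < PySem.List.len res := by
      rw [PySem.List.len_eq]; subst h; simp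
    rw [PySem.List.pyRange_one_cons hlt]
    have hx : PySem.List.pyGetD res ((pre.length : Int)) 'a' = x := by
      rw [PySem.List.pyGetD_natCast]
      subst h
      simp [List.getD_eq_getElem?_getD]
    by_cases hc : c = x
    · subst hc
      rw [solInner, if_pos hx.symm, PySem.List.index?_cons_self]
      norm_num
    · have hne : x ≠ c := fun he => hc he.symm
      rw [solInner, if_neg (by rw [hx]; exact hc), PySem.List.index?_cons_of_ne _ hne]
      have hcast : ((pre.length : Int) + 1) = (((pre ++ [x]).length : Int)) := by simp
      rw [hcast, ih (pre ++ [x]) (by simp [h])]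
      cases hidx : PySem.List.index? t c with
      | none => simp
      | some j =>
        simp only [Option.map_some]
        have : (pre ++ [x]).length + j = pre.length + (j + 1) := by simp; omega
        rw [this]

-- if c is not in res, the scan yields nothing
theorem scan_none (res : List Char) (index : Int) (c : Char) (h : c ∉ res) :
    solInner res index c (PySem.List.pyRange 0 (PySem.List.len res) 1) = [] := by
  have := scan_eq_index? res index c res [] (by simp)
  rw [(PySem.List.index?_eq_none_iff res c).mpr h] at this
  simpa using this

-- ===== unrank: the gap-reinsertion fold =====
def unrankN (q r : Nat) : Nat := if r ≤ q then q + 1 else q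

theorem unrank_le (l : List Nat) : ∀ q, List.foldl unrankN q l ≤ q + l.length := by
  induction l with
  | nil => intro q; simp
  | cons r t ih =>
    intro q
    simp only [List.foldl_cons, List.length_cons]
    by_cases hr : r ≤ q
    · have hs : unrankN q r = q + 1 := by unfold unrankN; rw [if_pos hr]
      rw [hs]
      have := ih (q+1); omega
    · have hs : unrankN q r = q := by unfold unrankN; rw [if_neg hr]
      rw [hs]
      have := ih q; omega

theorem unrank_shift (l : List Nat) : ∀ q, List.foldl unrankN q l = q + l.length →
    List.foldl unrankN (q+1) l = (q+1) + l.length := by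
  induction l with
  | nil => intro q _; simp
  | cons r t ih =>
    intro q h
    simp only [List.foldl_cons, List.length_cons] at h ⊢
    by_cases hr : r ≤ q
    · have hs1 : unrankN q r = q + 1 := by unfold unrankN; rw [if_pos hr]
      have hs2 : unrankN (q+1) r = q + 1 + 1 := by unfold unrankN; rw [if_pos (by omega)]
      rw [hs1] at h
      rw [hs2]
      have := ih (q+1) (by omega)
      omega
    · have hs1 : unrankN q r = q := by unfold unrankN; rw [if_neg hr]
      rw [hs1] at h
      have := unrank_le t q
      omega

theorem unrank_full (sk : List Char) : ∀ N, List.foldl unrankN ((keptL sk N).length) (remL sk N) = N := by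
  intro N
  induction N with
  | zero => rfl
  | succ N ih =>
    have hsplit : List.range (N+1) = List.range N ++ [N] := List.range_succ
    by_cases hk : keepP sk N = true
    · have hkept : keptL sk (N+1) = keptL sk N ++ [N] := by
        unfold keptL; rw [hsplit, List.filter_append]; simp [hk]
      have hrem : remL sk (N+1) = remL sk N := by
        unfold remL; rw [hsplit, List.filter_append]; simp [hk]
      rw [hkept, hrem]
      have hfull : List.foldl unrankN ((keptL sk N).length) (remL sk N) = (keptL sk N).length + (remL sk N).length := by
        rw [ih]; exact (kept_rem_len sk N).symm
      have hsh := unrank_shift (remL sk N) ((keptL sk N).length) hfull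
      have hlen := kept_rem_len sk N
      have hl1 : (keptL sk N ++ [N]).length = (keptL sk N).length + 1 := by simp
      rw [hl1, hsh]
      omega
    · have hk' : keepP sk N = false := by revert hk; cases keepP sk N <;> simp
      have hkept : keptL sk (N+1) = keptL sk N := by
        unfold keptL; rw [hsplit, List.filter_append]; simp [hk']
      have hrem : remL sk (N+1) = remL sk N ++ [N] := by
        unfold remL; rw [hsplit, List.filter_append]; simp [hk']
      rw [hkept, hrem, List.foldl_append, ih]
      simp [unrankN]

theorem unrank_getD (sk : List Char) : ∀ N t, t < (keptL sk N).length →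
    List.foldl unrankN t (remL sk N) = (keptL sk N).getD t 0 := by
  intro N
  induction N with
  | zero => intro t ht; simp [keptL] at ht
  | succ N ih =>
    intro t ht
    have hsplit : List.range (N+1) = List.range N ++ [N] := List.range_succ
    by_cases hk : keepP sk N = true
    · have hkept : keptL sk (N+1) = keptL sk N ++ [N] := by
        unfold keptL; rw [hsplit, List.filter_append]; simp [hk]
      have hrem : remL sk (N+1) = remL sk N := by
        unfold remL; rw [hsplit, List.filter_append]; simp [hk]
      rw [hkept] at ht
      rw [hkept, hrem]
      rcases Nat.lt_or_ge t (keptL sk N).length with hlt | hge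
      · rw [List.getD_append _ _ _ _ hlt]
        exact ih t hlt
      · have hteq : t = (keptL sk N).length := by
          simp only [List.length_append, List.length_cons, List.length_nil] at ht; omega
        subst hteq
        rw [unrank_full sk N, List.getD_eq_getElem?_getD, List.getElem?_append_right (le_refl _)]
        simp
    · have hk' : keepP sk N = false := by revert hk; cases keepP sk N <;> simp
      have hkept : keptL sk (N+1) = keptL sk N := by
        unfold keptL; rw [hsplit, List.filter_append]; simp [hk']
      have hrem : remL sk (N+1) = remL sk N ++ [N] := by
        unfold remL; rw [hsplit, List.filter_append]; simp [hk']
      rw [hkept] at ht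
      rw [hkept, hrem, List.foldl_append, ih t ht]
      have hmem : (keptL sk N).getD t 0 ∈ keptL sk N := by
        rw [List.getD_eq_getElem _ _ ht]; exact List.getElem_mem ht
      have hlt : (keptL sk N).getD t 0 < N := ((mem_keptL sk N _).mp hmem).1
      simp only [List.foldl_cons, List.foldl_nil, unrankN]
      rw [if_neg (by omega)]

-- the Int fold B runs is the Nat fold, cast
theorem unrank_cast (l : List Nat) : ∀ q : Nat,
    List.foldl (fun (q : Int) (r : Int) => if r ≤ q then q + 1 else q) (q : Int) (l.map (fun x : Nat => (x : Int))) =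
      ((List.foldl unrankN q l : Nat) : Int) := by
  induction l with
  | nil => intro q; simp
  | cons r t ih =>
    intro q
    simp only [List.map_cons, List.foldl_cons]
    by_cases hr : r ≤ q
    · rw [if_pos (show ((r : Nat) : Int) ≤ ((q : Nat) : Int) by exact_mod_cast hr)]
      have hs : unrankN q r = q + 1 := by unfold unrankN; rw [if_pos hr]
      rw [hs]
      have := ih (q+1)
      simpa using this
    · rw [if_neg (show ¬ ((r : Nat) : Int) ≤ ((q : Nat) : Int) by exact_mod_cast hr)]
      have hs : unrankN q r = q := by unfold unrankN; rw [if_neg hr]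
      rw [hs]
      exact ih q

-- ===== B's removed list is the canonical sorted removed-position list =====
theorem remLI_pairwise (sk : List Char) :
    ((remL sk 26).map (fun q : Nat => (q : Int))).Pairwise (fun a b => a < b) := by
  apply List.Pairwise.map (R := fun a b : Nat => a < b)
  · intro a b h; exact_mod_cast h
  · unfold remL; exact (List.pairwise_lt_range).filter _

theorem remLI_nodup (sk : List Char) :
    ((remL sk 26).map (fun q : Nat => (q : Int))).Nodup := by
  exact (remLI_pairwise sk).imp (fun h => ne_of_lt h)

theorem removed_eq (sk : List Char) :
    PySem.List.sorted (PySem.Set.ofList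
      ((sk.filter (fun c => 97 ≤ c.toNat && c.toNat ≤ 122)).map
        (fun c => (c.toNat : Int) - 97))) (fun x => x) false
    = (remL sk 26).map (fun q : Nat => (q : Int)) := by
  apply PySem.List.sorted_eq_of_perm_of_pairwise_lt
  · -- permutation: both are nodup with the same members
    apply (List.perm_ext_iff_of_nodup ?_ ?_).mpr
    · intro y
      rw [List.mem_map]
      constructor
      · rintro ⟨q, hq, rfl⟩
        rw [mem_remL] at hq
        obtain ⟨hq26, hkf⟩ := hq
        have hc : sk.contains (f26 q) = true := by
          unfold keepP at hkf; revert hkf; cases sk.contains (f26 q) <;> simp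
        rw [PySem.Set.mem_ofList, List.mem_map]
        refine ⟨f26 q, ?_, ?_⟩
        · rw [List.mem_filter]
          refine ⟨by simpa using hc, ?_⟩
          rw [f26_toNat q hq26]; simp; omega
        · rw [f26_toNat q hq26]; push_cast; omega
      · intro hy
        rw [PySem.Set.mem_ofList, List.mem_map] at hy
        obtain ⟨c, hc, rfl⟩ := hy
        rw [List.mem_filter] at hc
        obtain ⟨hmem, hrange⟩ := hc
        simp only [Bool.and_eq_true, decide_eq_true_eq] at hrange
        refine ⟨c.toNat - 97, ?_, by omega⟩
        rw [mem_remL]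
        constructor
        · omega
        · have hfc : f26 (c.toNat - 97) = c := by
            unfold f26
            have : 97 + (c.toNat - 97) = c.toNat := by omega
            rw [this, Char.ofNat_toNat]
          unfold keepP
          rw [hfc]
          simpa using hmem
    · exact remLI_nodup sk
    · exact PySem.Set.nodup_ofList _
  · -- strictly increasing
    exact remLI_pairwise sk

-- ===== MAIN PROOF =====

-- the reduced alphabet A builds, and the removed-position list B builds
def resR (sk : List Char) : List Char := (keptL sk 26).map f26
def rmlI (sk : List Char) : List Int := (remL sk 26).map (fun q : Nat => (q : Int))

-- per-character contribution of A (the inner scan) and of B (rank/unrank arithmetic)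
def gA (sk : List Char) (index : Int) (c : Char) : List Char :=
  solInner (resR sk) index c (PySem.List.pyRange 0 (PySem.List.len (resR sk)) 1)

def gB (sk : List Char) (index : Int) (c : Char) : List Char :=
  if (c.toNat : Int) - 97 < 0 || 26 ≤ (c.toNat : Int) - 97 || (rmlI sk).contains ((c.toNat : Int) - 97) then []
  else [Char.ofNat (97 + ((rmlI sk).foldl (fun q r => if r ≤ q then q + 1 else q)
    (PySem.Int.mod ((c.toNat : Int) - 97 - (((rmlI sk).filter (fun r => r < (c.toNat : Int) - 97)).length : Int) + index)
      (26 - PySem.List.len (rmlI sk))))).toNat]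

theorem mem_resR (sk : List Char) (c : Char) :
    c ∈ resR sk ↔ ∃ q : Nat, q < 26 ∧ keepP sk q = true ∧ c = f26 q := by
  unfold resR
  rw [List.mem_map]
  constructor
  · rintro ⟨q, hq, rfl⟩
    rw [mem_keptL] at hq
    exact ⟨q, hq.1, hq.2, rfl⟩
  · rintro ⟨q, h1, h2, rfl⟩
    exact ⟨q, (mem_keptL sk 26 q).mpr ⟨h1, h2⟩, rfl⟩

theorem index?_resR (sk : List Char) (p : Nat) (hp : p < 26) (hk : keepP sk p = true) :
    PySem.List.index? (resR sk) (f26 p) = some ((keptL sk p).length) := by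
  unfold resR
  rw [keptL_split sk p hp hk, List.map_append, List.map_append]
  rw [PySem.List.index?_append_of_mem _ (by simp)]
  have hnm : f26 p ∉ (keptL sk p).map f26 := by
    rw [List.mem_map]
    rintro ⟨q, hq, heq⟩
    have hqp : q < p := by
      unfold keptL at hq
      rw [List.mem_filter, List.mem_range] at hq
      exact hq.1
    have := f26_inj q p (by omega) hp heq
    omega
  have hms : List.map f26 [p] = [f26 p] := by simp
  rw [hms]
  apply (PySem.List.index?_eq_some_iff _ _ _).mpr
  refine ⟨List.map f26 (keptL sk p), [], rfl, by simp, hnm⟩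

theorem below_eq (sk : List Char) (p : Nat) (hp : p < 26) (hk : keepP sk p = true) :
    ((rmlI sk).filter (fun r => r < ((p : Nat) : Int))).length = (remL sk p).length := by
  unfold rmlI
  rw [List.filter_map, List.length_map]
  have hcong : (remL sk 26).filter ((fun r : Int => decide (r < (p : Int))) ∘ (fun q : Nat => (q : Int)))
      = (remL sk 26).filter (fun q : Nat => decide (q < p)) := by
    apply List.filter_congr
    intro q _
    simp only [Function.comp]
    by_cases h : q < p
    · rw [decide_eq_true (by exact_mod_cast h), decide_eq_true h]
    · rw [decide_eq_false (by exact_mod_cast h), decide_eq_false h]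
  rw [hcong, remL_split sk p hp hk, List.filter_append]
  have h1 : (remL sk p).filter (fun q : Nat => decide (q < p)) = remL sk p := by
    apply List.filter_eq_self.mpr
    intro q hq
    unfold remL at hq
    rw [List.mem_filter, List.mem_range] at hq
    exact decide_eq_true hq.1
  have h2 : (((List.range (25 - p)).map ((p+1) + ·)).filter (fun q => !(keepP sk q))).filter (fun q : Nat => decide (q < p)) = [] := by
    apply List.filter_eq_nil_iff.mpr
    intro q hq
    rw [List.mem_filter] at hq
    obtain ⟨hq, -⟩ := hq
    rw [List.mem_map] at hq
    obtain ⟨x, -, rfl⟩ := hq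
    simp only [decide_eq_true_eq]
    omega
  rw [h1, h2]
  simp

theorem char_eq (sk : List Char) (index : Int) (c : Char) : gA sk index c = gB sk index c := by
  by_cases hlo : 97 ≤ c.toNat
  case neg =>
    have hgB : gB sk index c = [] := by
      unfold gB
      rw [if_pos]
      apply Bool.or_eq_true_iff.mpr; left
      apply Bool.or_eq_true_iff.mpr; left
      exact decide_eq_true (by omega)
    rw [hgB]
    apply scan_none
    rw [mem_resR]
    rintro ⟨q, hq26, -, rfl⟩
    rw [f26_toNat q hq26] at hlo
    omega
  case pos =>
  by_cases hhi : c.toNat ≤ 122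
  case neg =>
    have hgB : gB sk index c = [] := by
      unfold gB
      rw [if_pos]
      apply Bool.or_eq_true_iff.mpr; left
      apply Bool.or_eq_true_iff.mpr; right
      exact decide_eq_true (by omega)
    rw [hgB]
    apply scan_none
    rw [mem_resR]
    rintro ⟨q, hq26, -, rfl⟩
    rw [f26_toNat q hq26] at hhi
    omega
  case pos =>
  -- c is a lowercase letter with position p
  set p : Nat := c.toNat - 97 with hpdef
  have hp26 : p < 26 := by omega
  have hcf : c = f26 p := by
    unfold f26
    have : 97 + p = c.toNat := by omega
    rw [this, Char.ofNat_toNat]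
  have hpI : (c.toNat : Int) - 97 = (p : Int) := by omega
  have hmemI : ∀ b : Bool, keepP sk p = b → ((rmlI sk).contains ((p : Int)) = !b) := by
    intro b hb
    cases b
    · simp only [Bool.not_false]
      apply List.elem_eq_true_of_mem
      unfold rmlI
      rw [List.mem_map]
      exact ⟨p, (mem_remL sk 26 p).mpr ⟨hp26, hb⟩, rfl⟩
    · simp only [Bool.not_true]
      rw [Bool.eq_false_iff]
      intro hcon
      rw [List.contains_iff_mem] at hcon
      unfold rmlI at hcon
      rw [List.mem_map] at hcon
      obtain ⟨q, hq, he⟩ := hcon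
      have : q = p := by exact_mod_cast he
      subst this
      rw [mem_remL] at hq
      rw [hq.2] at hb
      exact Bool.false_ne_true hb
  by_cases hk : keepP sk p = true
  case neg =>
    have hk' : keepP sk p = false := by revert hk; cases keepP sk p <;> simp
    have hgB : gB sk index c = [] := by
      unfold gB
      rw [if_pos]
      apply Bool.or_eq_true_iff.mpr; right
      rw [hpI]
      rw [hmemI false hk']
      rfl
    rw [hgB]
    apply scan_none
    rw [mem_resR]
    rintro ⟨q, hq26, hkq, hfe⟩
    have := f26_inj p q hp26 hq26 (by rw [← hcf, hfe])
    subst this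
    rw [hk'] at hkq
    exact Bool.false_ne_true hkq
  case pos =>
    -- both sides produce the shifted letter
    have hK : PySem.List.index? (resR sk) c = some ((keptL sk p).length) := by
      rw [hcf]; exact index?_resR sk p hp26 hk
    have hmemres : c ∈ resR sk := (mem_resR sk c).mpr ⟨p, hp26, hk, hcf⟩
    have hnlen : resR sk ≠ [] := by intro h; rw [h] at hmemres; exact List.not_mem_nil hmemres
    have hlen : (resR sk).length = (keptL sk 26).length := by unfold resR; exact List.length_map ..
    have hpos : 0 < (keptL sk 26).length := by
      rw [← hlen]
      exact List.length_pos_iff.mpr hnlen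
    have hlenI : PySem.List.len (resR sk) = ((keptL sk 26).length : Int) := by
      rw [PySem.List.len_eq, hlen]
    -- A's value
    have hscan := scan_eq_index? (resR sk) index c (resR sk) [] (by simp)
    rw [hK] at hscan
    have hA : gA sk index c =
        [PySem.List.pyGetD (resR sk) (PySem.Int.mod (((keptL sk p).length : Int) + index) ((keptL sk 26).length : Int)) 'a'] := by
      unfold gA
      have h0 : (([] : List Char).length : Int) = 0 := by simp
      rw [← h0, hscan]
      rw [hlenI]
      norm_num
    -- the common shift amount
    set t : Int := PySem.Int.mod (((keptL sk p).length : Int) + index) ((keptL sk 26).length : Int) with htdef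
    have hnposI : (0 : Int) < ((keptL sk 26).length : Int) := by exact_mod_cast hpos
    have ht0 : 0 ≤ t := PySem.Int.mod_nonneg _ hnposI
    have htlt : t < ((keptL sk 26).length : Int) := PySem.Int.mod_lt _ hnposI
    have htn : t = ((t.toNat : Nat) : Int) := (Int.toNat_of_nonneg ht0).symm
    have htnlt : t.toNat < (keptL sk 26).length := by omega
    -- A's character
    have hAc : PySem.List.pyGetD (resR sk) t 'a' = f26 ((keptL sk 26).getD t.toNat 0) := by
      conv_lhs => rw [htn, PySem.List.pyGetD_natCast]
      rw [List.getD_eq_getElem _ _ (by rw [hlen]; exact htnlt)]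
      rw [List.getD_eq_getElem _ _ htnlt]
      unfold resR
      rw [List.getElem_map]
    -- B's branch and value
    have hrmlen : (rmlI sk).length = (remL sk 26).length := by unfold rmlI; exact List.length_map ..
    have hn26 : 26 - PySem.List.len (rmlI sk) = ((keptL sk 26).length : Int) := by
      rw [PySem.List.len_eq, hrmlen]
      have := kept_rem_len sk 26
      omega
    have hq0 : PySem.Int.mod ((c.toNat : Int) - 97 - (((rmlI sk).filter (fun r => r < (c.toNat : Int) - 97)).length : Int) + index)
        (26 - PySem.List.len (rmlI sk)) = t := by
      rw [hn26, hpI, below_eq sk p hp26 hk, htdef]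
      have := kept_rem_len sk p
      have harg : (p : Int) - ((remL sk p).length : Int) + index = ((keptL sk p).length : Int) + index := by omega
      rw [harg]
    have hfold : (rmlI sk).foldl (fun q r => if r ≤ q then q + 1 else q) t = (((keptL sk 26).getD t.toNat 0 : Nat) : Int) := by
      unfold rmlI
      conv_lhs => rw [htn]
      rw [unrank_cast (remL sk 26) t.toNat, unrank_getD sk 26 t.toNat htnlt]
    have hcond : ((c.toNat : Int) - 97 < 0 || 26 ≤ (c.toNat : Int) - 97 || (rmlI sk).contains ((c.toNat : Int) - 97)) = false := by
      rw [hpI, hmemI true hk]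
      simp only [Bool.not_true, Bool.or_false, Bool.or_eq_false_iff]
      constructor
      · exact decide_eq_false (by omega)
      · exact decide_eq_false (by omega)
    have hgB : gB sk index c = [Char.ofNat (97 + ((keptL sk 26).getD t.toNat 0))] := by
      unfold gB
      rw [if_neg (by rw [hcond]; exact Bool.false_ne_true), hq0, hfold]
      have harg : ((97 : Int) + (((keptL sk 26).getD t.toNat 0 : Nat) : Int)).toNat = 97 + (keptL sk 26).getD t.toNat 0 := by omega
      rw [harg]
    rw [hA, hgB, hAc]
    rfl

-- A's program equals flatMap of gA; B's equals flatMap of gB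
theorem solutionA_eq (s skip : String) (index : Int) :
    solution s skip index = String.mk (s.toList.flatMap (gA skip.toList index)) := by
  unfold solution
  dsimp only
  rw [alphabet_eq, List.filter_map]
  have hpred : (List.range 26).filter ((fun x => !(skip.toList.contains x)) ∘ f26) = keptL skip.toList 26 := rfl
  rw [hpred]
  rw [PySem.List.foldl_pyRange_zero_pyGetD s.toList 'a'
    (fun acc ch => acc ++ solInner ((keptL skip.toList 26).map f26) index ch
      (PySem.List.pyRange 0 (PySem.List.len ((keptL skip.toList 26).map f26)) 1)) []]
  rw [PySem.List.foldl_append_eq_flatMap]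
  rfl

theorem solutionB_eq (s skip : String) (index : Int) :
    solution_alt s skip index = String.mk (s.toList.flatMap (gB skip.toList index)) := by
  unfold solution_alt
  dsimp only
  rw [removed_eq skip.toList]
  have hbody : (fun (acc : List Char) ch =>
      if (ch.toNat : Int) - 97 < 0 || 26 ≤ (ch.toNat : Int) - 97 || ((remL skip.toList 26).map (fun q : Nat => (q : Int))).contains ((ch.toNat : Int) - 97) then acc
      else acc ++ [Char.ofNat (97 + (((remL skip.toList 26).map (fun q : Nat => (q : Int))).foldl (fun q r => if r ≤ q then q + 1 else q)
        (PySem.Int.mod ((ch.toNat : Int) - 97 - ((((remL skip.toList 26).map (fun q : Nat => (q : Int))).filter (fun r => r < (ch.toNat : Int) - 97)).length : Int) + index)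
          (26 - PySem.List.len ((remL skip.toList 26).map (fun q : Nat => (q : Int))))))).toNat])
      = (fun acc ch => acc ++ gB skip.toList index ch) := by
    funext acc ch
    unfold gB rmlI
    split_ifs with h
    · simp
    · rfl
  rw [hbody, PySem.List.foldl_append_eq_flatMap]
  rfl


-- ===== VERDICT (by name: the statement is the Claim_ definition above) =====
theorem solution_spec : Claim_equal_solution := by
  intro s skip index _hdom
  unfold Spec_solution
  rw [solutionA_eq, solutionB_eq]
  have : gA skip.toList index = gB skip.toList index := funext (char_eq skip.toList index)
  rw [this]
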